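-- pv_equiv track=rewrite | github.com/intelligent-machine-learning/dlrover | atorch/atorch/distributed/distributed.py | _get_pg_ranks
-- ===== SOURCE A (Python) =====
-- def _get_pg_ranks(slicing_dim, rank_order, offset, total_size):
--     pg_ranks = {}
--     stride = 1
--     for (name, size) in slicing_dim:
--         mask = [True] * total_size
--         ranks_list = []
--         index = 0
--         while index < total_size:
--             if mask[index] is False:
--                 index += 1
--                 continue
--             ranks = []
--             next_index = index
--             for i in range(size):
--                 ranks.append(rank_order[offset + next_index])
--                 assert mask[next_index] is True
--                 mask[next_index] = False
--                 next_index += stride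
--             index += 1
--             ranks_list.append(ranks)
--         pg_ranks[name] = ranks_list
--         stride *= size
--     return pg_ranks
-- ===== SOURCE B (Python) =====
-- def _get_pg_ranks(slicing_dim, rank_order, offset, total_size):
--     pg_ranks = {}
--     stride = 1
--     for (name, size) in slicing_dim:
--         period = stride * size
--         pg_ranks[name] = [
--             [rank_order[offset + j + i * stride] for i in range(size)]
--             for j in range(total_size) if j % period < stride
--         ]
--         stride = period
--     return pg_ranks
-- ===== Notes on version B (the rewrite author's own statement) =====
-- stated objective: simpler
-- what changed: B replaces A's stateful boolean-mask skip-scan (mark group members False, re-test the mask at every index) by a stateless modular-arithmetic comprehension: j starts a group iff j % (stride*size) < stride, and the group's members are read directly at offset + j + i*stride; no mask, no skipping, no mutation.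
-- outside the precondition, e.g. on _get_pg_ranks([('a', 0)], [], 0, 1): A returns {'a': [[]]}, B raises ZeroDivisionError
import Mathlib
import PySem

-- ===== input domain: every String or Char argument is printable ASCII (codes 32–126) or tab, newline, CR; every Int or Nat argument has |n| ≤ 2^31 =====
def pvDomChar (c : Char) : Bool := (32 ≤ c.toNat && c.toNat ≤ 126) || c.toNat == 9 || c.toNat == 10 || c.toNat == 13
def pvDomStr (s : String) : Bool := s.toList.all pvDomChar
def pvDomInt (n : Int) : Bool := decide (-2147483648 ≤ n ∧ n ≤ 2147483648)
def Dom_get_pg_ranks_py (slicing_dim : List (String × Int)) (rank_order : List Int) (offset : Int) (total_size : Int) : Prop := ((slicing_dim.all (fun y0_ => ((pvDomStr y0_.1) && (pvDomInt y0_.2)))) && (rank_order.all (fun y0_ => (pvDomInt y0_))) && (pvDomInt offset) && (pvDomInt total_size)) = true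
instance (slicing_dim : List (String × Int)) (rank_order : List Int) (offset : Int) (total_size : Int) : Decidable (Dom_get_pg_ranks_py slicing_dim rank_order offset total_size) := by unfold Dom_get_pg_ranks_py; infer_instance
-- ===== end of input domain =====

-- B replaces A's boolean-mask skip-scan with direct index arithmetic over (block, inner, i);
-- objective: simpler (no mask array, no skip loop), same asymptotic cost.

-- ===== PORT A =====
-- inner `for i in range(size)` loop of A: appends rank_order[offset + next_index], sets
-- mask[next_index] = False, advances next_index by stride (the assert holds on Pre_-admitted inputs)
def pvInnerA (ro : List Int) (o stride : Int) (mask : List Bool) (next : Int) : Nat → List Int × List Bool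
  | 0 => ([], mask)
  | q+1 =>
    let r := PySem.List.pyGetD ro (o + next) 0
    let mask' := PySem.List.pySetD mask next false
    let p := pvInnerA ro o stride mask' (next + stride) q
    (r :: p.1, p.2)

-- A's `while index < total_size` loop: index starts at 0 and increases by 1 at the end of both
-- branches, so the loop body runs exactly total_size.toNat times (the fuel)
def pvScanA (ro : List Int) (o stride size : Int) (mask : List Bool) (acc : List (List Int)) (index : Int) : Nat → List (List Int)
  | 0 => acc
  | f+1 =>
    if PySem.List.pyGetD mask index false = false then
      pvScanA ro o stride size mask acc (index+1) f
    else
      let p := pvInnerA ro o stride mask index size.toNat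
      pvScanA ro o stride size p.2 (acc ++ [p.1]) (index+1) f

-- one iteration of A's `for (name, size) in slicing_dim` loop (state = (pg_ranks, stride))
def pvStepA (ro : List Int) (o total : Int) (st : PySem.Dict String (List (List Int)) × Int) (nd : String × Int) : PySem.Dict String (List (List Int)) × Int :=
  (st.1.insert nd.1 (pvScanA ro o st.2 nd.2 (List.replicate total.toNat true) [] 0 total.toNat), st.2 * nd.2)

def get_pg_ranks_py (slicing_dim : List (String × Int)) (rank_order : List Int) (offset : Int) (total_size : Int) : List (String × List (List Int)) :=
  ((slicing_dim.foldl (pvStepA rank_order offset total_size) (PySem.Dict.empty, 1)).1).items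

-- ===== PORT B =====
-- B's filtered comprehension for one dimension: j starts a group iff j %% period < stride
def pvGroupsB (ro : List Int) (o stride size total : Int) : List (List Int) :=
  ((PySem.List.pyRange 0 total 1).filter (fun j => decide (PySem.Int.mod j (stride * size) < stride))).map (fun j =>
    (PySem.List.pyRange 0 size 1).map (fun i =>
      PySem.List.pyGetD ro (o + j + i * stride) 0))

-- one iteration of B's `for (name, size) in slicing_dim` loop (state = (pg_ranks, stride))
def pvStepB (ro : List Int) (o total : Int) (st : PySem.Dict String (List (List Int)) × Int) (nd : String × Int) : PySem.Dict String (List (List Int)) × Int :=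
  (st.1.insert nd.1 (pvGroupsB ro o st.2 nd.2 total), st.2 * nd.2)

def get_pg_ranks_py_alt (slicing_dim : List (String × Int)) (rank_order : List Int) (offset : Int) (total_size : Int) : List (String × List (List Int)) :=
  ((slicing_dim.foldl (pvStepB rank_order offset total_size) (PySem.Dict.empty, 1)).1).items

-- ===== PRECONDITION & SPEC =====
-- product of the sizes of the first n dimensions (prefix product; A's running stride)
def pvPrefProd (sd : List (String × Int)) (n : Nat) : Int :=
  (sd.take n).foldl (fun a p => a * p.2) 1

-- Pre_ excludes (cites in claim.json): for positive total_size, dimension lists with a non-positive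
-- size — there A's mask loop degenerates to per-index empty groups while B raises ZeroDivisionError
-- (zero period) or disagrees once a later dimension sees the non-positive running stride — and the
-- inputs on which Python A raises (IndexError/AssertionError): an index offset+j outside rank_order
-- for some scanned j in [0,total_size), or a positive total_size not divisible by some running
-- prefix product of sizes.
def Pre_get_pg_ranks_py (slicing_dim : List (String × Int)) (rank_order : List Int) (offset : Int) (total_size : Int) : Prop :=
  total_size ≤ 0 ∨ slicing_dim = [] ∨
    ((∀ p ∈ slicing_dim, 1 ≤ p.2) ∧
     -(rank_order.length : Int) ≤ offset ∧ offset + total_size ≤ (rank_order.length : Int) ∧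
     ∀ n ∈ List.range (slicing_dim.length + 1), pvPrefProd slicing_dim n ∣ total_size)
instance (slicing_dim : List (String × Int)) (rank_order : List Int) (offset : Int) (total_size : Int) : Decidable (Pre_get_pg_ranks_py slicing_dim rank_order offset total_size) := by unfold Pre_get_pg_ranks_py; infer_instance

def pvWitness_get_pg_ranks_py : (List (String × Int)) × List Int × Int × Int :=
  ([("a", 2), ("b", 2)], [10, 11, 12, 13], 0, 4)

def Spec_get_pg_ranks_py (slicing_dim : List (String × Int)) (rank_order : List Int) (offset : Int) (total_size : Int) (out : List (String × List (List Int))) : Prop := out = get_pg_ranks_py_alt slicing_dim rank_order offset total_size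
instance (slicing_dim : List (String × Int)) (rank_order : List Int) (offset : Int) (total_size : Int) (out : List (String × List (List Int))) : Decidable (Spec_get_pg_ranks_py slicing_dim rank_order offset total_size out) := by unfold Spec_get_pg_ranks_py; infer_instance

-- ===== CLAIM (what is proved, stated in full; the proofs are below) =====
def Claim_equal_get_pg_ranks_py : Prop := ∀ (slicing_dim : List (String × Int)) (rank_order : List Int) (offset : Int) (total_size : Int), Dom_get_pg_ranks_py slicing_dim rank_order offset total_size → Pre_get_pg_ranks_py slicing_dim rank_order offset total_size → Spec_get_pg_ranks_py slicing_dim rank_order offset total_size (get_pg_ranks_py slicing_dim rank_order offset total_size)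

-- ===== LEMMAS AND PROOFS =====

-- `pvStart s k j` is the start (smallest member) of the group index j belongs to in a pass with
-- stride s and group size k; `pvMaskAt s k T i` is A's mask when the scan index has reached i
-- (entry j is still True iff the group start of j has not been scanned yet); `pvGrp` is the group
-- emitted for a start a.
def pvStart (s k j : Nat) : Nat := (j / (s*k)) * (s*k) + j % s
def pvMaskAt (s k T i : Nat) : List Bool := (List.range T).map (fun j => decide (i ≤ pvStart s k j))
def pvGrp (ro : List Int) (o : Int) (s k a : Nat) : List Int :=
  (List.range k).map (fun (i : Nat) => PySem.List.pyGetD ro (o + (a:Int) + (i:Int) * (s:Int)) 0)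

theorem pvStart_le (s k j : Nat) (_hs : 1 ≤ s) : pvStart s k j ≤ j := by
  unfold pvStart
  have h1 : j % s = j % (s*k) % s := (Nat.mod_mod_of_dvd j (dvd_mul_right s k)).symm
  have h2 : j % (s*k) % s ≤ j % (s*k) := Nat.mod_le _ _
  have h3 : j / (s*k) * (s*k) + j % (s*k) = j := by rw [Nat.mul_comm]; exact Nat.div_add_mod j (s*k)
  omega

theorem pvStart_eq_self_iff (s k j : Nat) (hs : 1 ≤ s) : pvStart s k j = j ↔ j % (s*k) < s := by
  unfold pvStart
  have h3 : j / (s*k) * (s*k) + j % (s*k) = j := by rw [Nat.mul_comm]; exact Nat.div_add_mod j (s*k)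
  have h1 : j % s = j % (s*k) % s := (Nat.mod_mod_of_dvd j (dvd_mul_right s k)).symm
  have h4 : j % s < s := Nat.mod_lt _ (by omega)
  constructor
  · intro h
    have h5 : j % s = j % (s*k) := by omega
    omega
  · intro h
    have : j % (s*k) % s = j % (s*k) := Nat.mod_eq_of_lt h
    omega

theorem pvStart_eq_imp_start (s k a j : Nat) (hs : 1 ≤ s) (h : pvStart s k j = a) :
    pvStart s k a = a := by
  by_cases hk0 : k = 0
  · subst hk0
    unfold pvStart at *
    simp only [Nat.mul_zero, Nat.div_zero, Nat.zero_add] at *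
    have : j % s < s := Nat.mod_lt _ (by omega)
    subst h
    exact Nat.mod_eq_of_lt this
  · have hsk : 0 < s*k := Nat.mul_pos (by omega) (by omega)
    have hjs : j % s < s := Nat.mod_lt _ (by omega)
    have hsle : s ≤ s*k := Nat.le_mul_of_pos_right s (by omega)
    have hmod : a % (s*k) = j % s := by
      rw [← h]; unfold pvStart
      rw [Nat.mul_add_mod']
      exact Nat.mod_eq_of_lt (by omega)
    rw [pvStart_eq_self_iff s k a hs, hmod]; omega

theorem pvStart_eq_iff (s k a j : Nat) (hs : 1 ≤ s) (hk : 1 ≤ k) (ha : a % (s*k) < s) :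
    pvStart s k j = a ↔ ∃ t, t < k ∧ j = a + t*s := by
  have hsk : 0 < s*k := Nat.mul_pos (by omega) (by omega)
  constructor
  · intro h
    refine ⟨(j % (s*k)) / s, ?_, ?_⟩
    · have h6 : j % (s*k) < s*k := Nat.mod_lt _ hsk
      exact Nat.div_lt_of_lt_mul (by omega)
    · have h3 : j / (s*k) * (s*k) + j % (s*k) = j := by rw [Nat.mul_comm]; exact Nat.div_add_mod j (s*k)
      have h4 : (j % (s*k)) / s * s + (j % (s*k)) % s = j % (s*k) := by rw [Nat.mul_comm]; exact Nat.div_add_mod _ s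
      have h1 : j % (s*k) % s = j % s := Nat.mod_mod_of_dvd j (dvd_mul_right s k)
      unfold pvStart at h
      omega
  · rintro ⟨t, ht, rfl⟩
    have h3 : a / (s*k) * (s*k) + a % (s*k) = a := by rw [Nat.mul_comm]; exact Nat.div_add_mod a (s*k)
    have hts : t*s + s ≤ s*k := by
      calc t*s + s = (t+1)*s := by ring
      _ ≤ k*s := Nat.mul_le_mul_right s (by omega)
      _ = s*k := Nat.mul_comm k s
    have hlt : a % (s*k) + t*s < s*k := by omega
    have hdiv : (a + t*s) / (s*k) = a / (s*k) := by
      rw [show a + t*s = (a % (s*k) + t*s) + (a/(s*k))*(s*k) by omega]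
      rw [Nat.add_mul_div_right _ _ hsk, Nat.div_eq_of_lt hlt]; omega
    have hmod5 : (a + t*s) % s = a % s := by
      simp [Nat.add_mul_mod_self_right]
    have h1 : a % (s*k) % s = a % s := Nat.mod_mod_of_dvd a (dvd_mul_right s k)
    have h2 : a % (s*k) % s = a % (s*k) := Nat.mod_eq_of_lt ha
    unfold pvStart
    rw [hdiv, hmod5]
    omega

theorem pvMaskAt_read (s k T a : Nat) (hs : 1 ≤ s) (ha : a < T) :
    PySem.List.pyGetD (pvMaskAt s k T a) (a:Int) false = decide (pvStart s k a = a) := by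
  unfold pvMaskAt
  rw [PySem.List.pyGetD_natCast]
  rw [List.getD_eq_getElem _ _ (by simpa using ha)]
  simp only [List.getElem_map, List.getElem_range]
  have := pvStart_le s k a hs
  by_cases h : pvStart s k a = a <;> simp [h] <;> omega

theorem foldl_set_getElem? (ps : List Nat) :
    ∀ (m : List Bool) (j : Nat),
      (ps.foldl (fun mm p => mm.set p false) m)[j]?
        = if j ∈ ps ∧ j < m.length then some false else m[j]? := by
  induction ps with
  | nil => intro m j; simp
  | cons p ps ih =>
    intro m j
    rw [List.foldl_cons, ih (m.set p false) j]
    simp only [List.length_set, List.getElem?_set, List.mem_cons]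
    by_cases hjp : j = p
    · subst hjp
      by_cases hlt : j < m.length
      · by_cases hmem : j ∈ ps <;> simp [hlt, hmem]
      · have hnone : m[j]? = none := List.getElem?_eq_none (by omega)
        by_cases hmem : j ∈ ps <;> simp [hlt, hmem]
    · by_cases hmem : j ∈ ps <;> simp [hmem, hjp, Ne.symm hjp]

theorem pvMaskAt_step_start (s k T a : Nat) (hs : 1 ≤ s) (hk : 1 ≤ k) (_hdvd : (s*k) ∣ T)
    (_ha : a < T) (hst : pvStart s k a = a) :
    ((List.range k).map (fun t => a + t*s)).foldl (fun mm p => mm.set p false) (pvMaskAt s k T a)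
      = pvMaskAt s k T (a+1) := by
  have hmem : ∀ j : Nat, (j ∈ (List.range k).map (fun t => a + t*s)) ↔ pvStart s k j = a := by
    intro j
    rw [pvStart_eq_iff s k a j hs hk ((pvStart_eq_self_iff s k a hs).1 hst)]
    simp only [List.mem_map, List.mem_range]
    constructor
    · rintro ⟨t, ht, rfl⟩; exact ⟨t, ht, rfl⟩
    · rintro ⟨t, ht, rfl⟩; exact ⟨t, ht, rfl⟩
  have hget : ∀ (i j : Nat), (pvMaskAt s k T i)[j]? = if j < T then some (decide (i ≤ pvStart s k j)) else none := by
    intro i j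
    unfold pvMaskAt
    by_cases hj : j < T
    · rw [List.getElem?_eq_getElem (by simpa using hj)]
      simp [hj]
    · rw [List.getElem?_eq_none (by simpa using hj), if_neg hj]
  apply List.ext_getElem?
  intro j
  rw [foldl_set_getElem?, hget, hget]
  have hlen : (pvMaskAt s k T a).length = T := by unfold pvMaskAt; simp
  by_cases hj : j < T
  · simp only [hmem, hlen, hj, if_pos]
    by_cases hstart : pvStart s k j = a
    · simp [hstart]
    · have hiff : (a+1 ≤ pvStart s k j) = (a ≤ pvStart s k j) := by
        apply propext; omega
      simp [hstart, hiff]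
  · simp [hj, hlen]

theorem pvMaskAt_step_skip (s k T a : Nat) (hs : 1 ≤ s) (hns : pvStart s k a ≠ a) :
    pvMaskAt s k T a = pvMaskAt s k T (a+1) := by
  unfold pvMaskAt
  apply List.map_congr_left
  intro j hj
  have : pvStart s k j ≠ a := fun h => hns (pvStart_eq_imp_start s k a j hs h)
  by_cases h2 : a ≤ pvStart s k j <;> [skip; skip] <;> simp [h2] <;> omega

theorem pvInnerA_fst (ro : List Int) (o : Int) (s : Nat) :
    ∀ (q a : Nat) (m : List Bool),
      (pvInnerA ro o (s:Int) m (a:Int) q).1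
        = (List.range q).map (fun (i : Nat) => PySem.List.pyGetD ro (o + (a:Int) + (i:Int) * (s:Int)) 0) := by
  intro q
  induction q with
  | zero => intro a m; simp [pvInnerA]
  | succ q ih =>
    intro a m
    rw [pvInnerA]
    simp only
    rw [show (a:Int) + (s:Int) = ((a + s : Nat) : Int) by push_cast; ring] 
    rw [ih (a+s)]
    rw [List.range_succ_eq_map, List.map_cons, List.map_map]
    congr 1
    · push_cast; ring_nf
    · apply List.map_congr_left
      intro i _
      simp only [Function.comp]
      congr 1
      push_cast; ring

theorem pvInnerA_snd (ro : List Int) (o : Int) (s : Nat) :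
    ∀ (q a : Nat) (m : List Bool),
      (pvInnerA ro o (s:Int) m (a:Int) q).2
        = ((List.range q).map (fun t => a + t*s)).foldl (fun mm p => mm.set p false) m := by
  intro q
  induction q with
  | zero => intro a m; simp [pvInnerA]
  | succ q ih =>
    intro a m
    rw [pvInnerA]
    simp only
    rw [show (a:Int) + (s:Int) = ((a + s : Nat) : Int) by push_cast; ring]
    rw [ih (a+s)]
    rw [List.range_succ_eq_map, List.map_cons, List.map_map, List.foldl_cons]
    have h1 : PySem.List.pySetD m (a:Int) false = m.set a false := by
      simpa using PySem.List.pySetD_natCast (xs := m) (n := a) (v := false)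
    rw [h1]
    congr 1
    · norm_num
    · apply List.map_congr_left
      intro t _
      simp only [Function.comp]
      rw [Nat.succ_mul]
      omega

theorem pvScanA_spec (ro : List Int) (o : Int) (s k T : Nat) (hs : 1 ≤ s) (hk : 1 ≤ k)
    (hdvd : (s*k) ∣ T) :
    ∀ (f a : Nat) (acc : List (List Int)), a + f = T →
      pvScanA ro o (s:Int) (k:Int) (pvMaskAt s k T a) acc (a:Int) f
        = acc ++ ((List.range' a f).filter (fun j => decide (j % (s*k) < s))).map (pvGrp ro o s k) := by
  intro f
  induction f with
  | zero => intro a acc h; simp [pvScanA]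
  | succ f ih =>
    intro a acc h
    have ha : a < T := by omega
    rw [pvScanA]
    rw [pvMaskAt_read s k T a hs ha]
    rw [List.range'_succ]
    by_cases hst : pvStart s k a = a
    · -- group branch
      rw [if_neg (by simp [hst])]
      simp only
      have hkk : ((k:Int)).toNat = k := by simp
      rw [hkk]
      rw [pvInnerA_fst ro o s k a _, pvInnerA_snd ro o s k a _]
      rw [pvMaskAt_step_start s k T a hs hk hdvd ha hst]
      rw [show ((a:Int) + 1) = ((a+1 : Nat) : Int) by push_cast; ring]
      rw [show (List.range k).map (fun (i : Nat) => PySem.List.pyGetD ro (o + (a:Int) + (i:Int) * (s:Int)) 0) = pvGrp ro o s k a from rfl]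
      rw [ih (a+1) (acc ++ [pvGrp ro o s k a]) (by omega)]
      have hfil : (a % (s*k) < s) := (pvStart_eq_self_iff s k a hs).1 hst
      rw [List.filter_cons, if_pos (by simpa using hfil)]
      simp [pvGrp, List.append_assoc]
    · -- skip branch
      rw [if_pos (by simp [hst])]
      rw [pvMaskAt_step_skip s k T a hs hst]
      rw [show ((a:Int) + 1) = ((a+1 : Nat) : Int) by push_cast; ring]
      rw [ih (a+1) acc (by omega)]
      have hfil : ¬ (a % (s*k) < s) := fun hcon => hst ((pvStart_eq_self_iff s k a hs).2 hcon)
      rw [List.filter_cons, if_neg (by simpa using hfil)]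

theorem pvGroupsB_spec (ro : List Int) (o : Int) (s k T : Nat) :
    pvGroupsB ro o (s:Int) (k:Int) (T:Int)
      = ((List.range T).filter (fun j => decide (j % (s*k) < s))).map (pvGrp ro o s k) := by
  unfold pvGroupsB
  rw [PySem.List.pyRange_zero_natCast T]
  rw [List.filter_map, List.map_map]
  have hpred : ((fun j => decide (PySem.Int.mod j ((s:Int) * (k:Int)) < (s:Int))) ∘ (fun (j : Nat) => (j:Int)))
      = fun (j : Nat) => decide (j % (s*k) < s) := by
    funext j
    simp only [Function.comp]
    have hmod : PySem.Int.mod (j:Int) ((s:Int) * (k:Int)) = ((j % (s*k) : Nat) : Int) := by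
      rw [show ((s:Int) * (k:Int)) = ((s*k : Nat) : Int) by push_cast; ring]
      exact PySem.Int.mod_natCast j (s*k)
    rw [hmod]
    simp only [Nat.cast_lt]
  rw [hpred]
  apply List.map_congr_left
  intro j hj
  simp only [Function.comp]
  unfold pvGrp
  rw [PySem.List.pyRange_zero_natCast k]
  rw [List.map_map]
  rfl

theorem pvDim_eq (ro : List Int) (o stride size total : Int)
    (hd : total ≤ 0 ∨ (1 ≤ stride ∧ 1 ≤ size ∧ (stride * size) ∣ total)) :
    pvScanA ro o stride size (List.replicate total.toNat true) [] 0 total.toNat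
      = pvGroupsB ro o stride size total := by
  by_cases ht : total ≤ 0
  · have h0 : total.toNat = 0 := Int.toNat_of_nonpos ht
    rw [h0]
    rw [show pvScanA ro o stride size (List.replicate 0 true) [] 0 0 = [] from rfl]
    unfold pvGroupsB
    rw [PySem.List.pyRange_one_eq_nil (a := 0) (b := total) ht]
    rfl
  · obtain ⟨hs, hk, hdvd⟩ : 1 ≤ stride ∧ 1 ≤ size ∧ (stride * size) ∣ total := hd.resolve_left ht
    set s := stride.toNat with hsdef
    set k := size.toNat with hkdef
    set T := total.toNat with hTdef
    have hcs : stride = (s:Int) := by omega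
    have hck : size = (k:Int) := by omega
    have hcT : total = (T:Int) := by omega
    have hs1 : 1 ≤ s := by omega
    have hk1 : 1 ≤ k := by omega
    have hdvdN : (s*k) ∣ T := by
      have h2 : ((s*k : Nat) : Int) ∣ ((T:Nat) : Int) := by
        push_cast
        rw [← hcs, ← hck, ← hcT]
        exact hdvd
      exact_mod_cast h2
    rw [hcs, hck, hcT]
    have hmask : List.replicate T true = pvMaskAt s k T 0 := by
      unfold pvMaskAt
      simp
    rw [hmask]
    rw [show ((0:Int)) = ((0:Nat) : Int) from rfl]
    rw [pvScanA_spec ro o s k T hs1 hk1 hdvdN T 0 [] (by omega)]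
    rw [pvGroupsB_spec ro o s k T]
    rw [List.nil_append, List.range_eq_range']

theorem pvFoldlMul (l : List (String × Int)) : ∀ c : Int,
    l.foldl (fun a p => a * p.2) c = c * l.foldl (fun a p => a * p.2) 1 := by
  induction l with
  | nil => intro c; simp
  | cons p l ih =>
    intro c
    rw [List.foldl_cons, List.foldl_cons, ih (c * p.2), ih (1 * p.2)]
    ring

theorem pvFold_eq (ro : List Int) (o total : Int) :
    ∀ (sd : List (String × Int)) (d : PySem.Dict String (List (List Int))) (stride : Int),
      (total ≤ 0 ∨ (1 ≤ stride ∧ (∀ p ∈ sd, 1 ≤ p.2) ∧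
        ∀ n : Nat, (stride * ((sd.take n).foldl (fun a p => a * p.2) 1)) ∣ total)) →
      sd.foldl (pvStepA ro o total) (d, stride) = sd.foldl (pvStepB ro o total) (d, stride) := by
  intro sd
  induction sd with
  | nil => intro d stride _; rfl
  | cons nd tl ih =>
    intro d stride hyp
    have hdim : pvScanA ro o stride nd.2 (List.replicate total.toNat true) [] 0 total.toNat
        = pvGroupsB ro o stride nd.2 total := by
      apply pvDim_eq ro o stride nd.2 total
      rcases hyp with h | ⟨hstr, hsz, h⟩
      · exact Or.inl h
      · right
        refine ⟨hstr, hsz nd (by simp), ?_⟩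
        have h1 := h 1
        simp only [List.take_succ_cons, List.take_zero, List.foldl_cons, List.foldl_nil] at h1
        rwa [one_mul] at h1
    rw [List.foldl_cons, List.foldl_cons]
    unfold pvStepA pvStepB
    simp only
    rw [hdim]
    apply ih
    rcases hyp with h | ⟨hstr, hsz, h⟩
    · exact Or.inl h
    · right
      have hnd : 1 ≤ nd.2 := hsz nd (by simp)
      refine ⟨by nlinarith, fun p hp => hsz p (by simp [hp]), ?_⟩
      intro n
      have hn := h (n+1)
      simp only [List.take_succ_cons, List.foldl_cons] at hn
      rw [pvFoldlMul (tl.take n) (1 * nd.2)] at hn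
      have heq : stride * (1 * nd.2 * (tl.take n).foldl (fun a p => a * p.2) 1)
          = stride * nd.2 * (tl.take n).foldl (fun a p => a * p.2) 1 := by ring
      rwa [heq] at hn

theorem main_spec (slicing_dim : List (String × Int)) (rank_order : List Int) (offset : Int) (total_size : Int)
    (hpre : Pre_get_pg_ranks_py slicing_dim rank_order offset total_size) :
    get_pg_ranks_py slicing_dim rank_order offset total_size = get_pg_ranks_py_alt slicing_dim rank_order offset total_size := by
  unfold get_pg_ranks_py get_pg_ranks_py_alt
  congr 1
  apply congrArg
  apply pvFold_eq rank_order offset total_size slicing_dim PySem.Dict.empty 1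
  rcases hpre with h | h | ⟨hsz, _, _, h⟩
  · exact Or.inl h
  · subst h
    right
    refine ⟨le_rfl, by simp, fun n => by simp⟩
  · right
    refine ⟨le_rfl, hsz, ?_⟩
    intro n
    rw [one_mul]
    by_cases hn : n ≤ slicing_dim.length
    · have := h n (List.mem_range.2 (by omega))
      unfold pvPrefProd at this
      exact this
    · have := h slicing_dim.length (List.mem_range.2 (by omega))
      unfold pvPrefProd at this
      rw [List.take_of_length_le (by omega : slicing_dim.length ≤ n)]
      rwa [List.take_of_length_le le_rfl] at this

-- ===== VERDICT (by name: the statement is the Claim_ definition above) =====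
theorem get_pg_ranks_py_spec : Claim_equal_get_pg_ranks_py := by
  intro slicing_dim rank_order offset total_size _ hpre
  unfold Spec_get_pg_ranks_py
  exact main_spec slicing_dim rank_order offset total_size hpre
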